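-- pv_equiv track=rewrite | github.com/art-kors/document-formatter | app/standards/parser.py | _split_heading_tail
-- ===== SOURCE A (Python) =====
-- from typing import Dict, List, Tuple
--
-- def _split_heading_tail(rest: str) -> Tuple[str, str]:
--     words = rest.split()
--     if not words:
--         return rest.strip(), ""
--
--     title_words: List[str] = []
--     seen_lowercase = False
--     for index, word in enumerate(words):
--         clean = word.strip('".,;:()[]')
--         if index > 0 and seen_lowercase and clean and clean[0].isupper():
--             return " ".join(title_words).strip(), " ".join(words[index:]).strip()
--
--         title_words.append(word)
--         if clean and clean[0].islower():
--             seen_lowercase = True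
--
--     return " ".join(title_words).strip(), ""
-- ===== SOURCE B (Python) =====
-- def _split_heading_tail(rest):
--     words = rest.split()
--     if not words:
--         return rest.strip(), ""
--     cleans = [w.strip('".,;:()[]') for w in words]
--     first_lower = next((i for i, c in enumerate(cleans) if c and c[0].islower()), None)
--     if first_lower is None:
--         return " ".join(words).strip(), ""
--     split_at = next((first_lower + 1 + k
--                      for k, c in enumerate(cleans[first_lower + 1:])
--                      if c and c[0].isupper()), None)
--     if split_at is None:
--         return " ".join(words).strip(), ""
--     return " ".join(words[:split_at]).strip(), " ".join(words[split_at:]).strip()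
-- ===== Notes on version B (the rewrite author's own statement) =====
-- stated objective: alternative
-- what changed: Replaces A's single pass that carries a seen_lowercase flag and a growing title_words accumulator with two independent index searches over precomputed cleaned tokens (first lowercase-starting token, then first uppercase-starting token after it) followed by one take/drop split.
import Mathlib
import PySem

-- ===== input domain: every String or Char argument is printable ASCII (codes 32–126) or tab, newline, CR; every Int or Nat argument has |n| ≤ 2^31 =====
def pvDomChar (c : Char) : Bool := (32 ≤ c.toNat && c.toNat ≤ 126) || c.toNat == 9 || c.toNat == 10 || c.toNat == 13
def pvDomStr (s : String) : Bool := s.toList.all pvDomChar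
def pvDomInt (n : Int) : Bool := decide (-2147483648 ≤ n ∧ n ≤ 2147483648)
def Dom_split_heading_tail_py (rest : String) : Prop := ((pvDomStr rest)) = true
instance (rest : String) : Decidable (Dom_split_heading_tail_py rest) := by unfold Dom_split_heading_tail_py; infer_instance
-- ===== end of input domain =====

-- B replaces A's single loop with a mutable flag by two independent index searches
-- (first lowercase-starting token, then first uppercase-starting token after it); objective: alternative decomposition, same cost.

-- ===== PORT A =====

-- the characters Python's word.strip('".,;:()[]') removes
def pvPunct : List Char := ['"', ',', '.', ';', ':', '(', ')', '[', ']']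

-- the loop of A: remaining words, current index, title_words accumulator, seen_lowercase flag
def pvLoopA : List (List Char) → Nat → List (List Char) → Bool → List Char × List Char
  | [], _, title, _ => (PySem.Chars.strip (PySem.Chars.join [' '] title), [])
  | w :: ws, index, title, seen =>
    let clean := PySem.Chars.stripChars w pvPunct
    if index > 0 ∧ seen = true ∧ (match clean with | [] => false | c :: _ => PySem.Chars.isupper c) = true then
      (PySem.Chars.strip (PySem.Chars.join [' '] title),
       PySem.Chars.strip (PySem.Chars.join [' '] (w :: ws)))
    else
      pvLoopA ws (index + 1) (title ++ [w])
        (seen || (match clean with | [] => false | c :: _ => PySem.Chars.islower c))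

def split_heading_tail_py (rest : String) : String × String :=
  let words := PySem.Chars.split₀ rest.toList
  if words = [] then (String.ofList (PySem.Chars.strip rest.toList), "")
  else
    let r := pvLoopA words 0 [] false
    (String.ofList r.1, String.ofList r.2)

-- ===== PORT B =====

-- clean = word.strip('".,;:()[]') (same punctuation set as A)
def pvClean (w : List Char) : List Char := PySem.Chars.stripChars w pvPunct

-- 'clean and clean[0].islower()' / '… .isupper()'
def pvStartsLower (c : List Char) : Bool := match c with | [] => false | ch :: _ => PySem.Chars.islower ch
def pvStartsUpper (c : List Char) : Bool := match c with | [] => false | ch :: _ => PySem.Chars.isupper ch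

def split_heading_tail_py_alt (rest : String) : String × String :=
  let words := PySem.Chars.split₀ rest.toList
  if words = [] then (String.ofList (PySem.Chars.strip rest.toList), "")
  else
    let cleans := words.map pvClean
    match cleans.findIdx? pvStartsLower with
    | none => (String.ofList (PySem.Chars.strip (PySem.Chars.join [' '] words)), "")
    | some fl =>
      match (cleans.drop (fl + 1)).findIdx? pvStartsUpper with
      | none => (String.ofList (PySem.Chars.strip (PySem.Chars.join [' '] words)), "")
      | some k =>
        let i := fl + 1 + k
        (String.ofList (PySem.Chars.strip (PySem.Chars.join [' '] (words.take i))),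
         String.ofList (PySem.Chars.strip (PySem.Chars.join [' '] (words.drop i))))

-- ===== PRECONDITION & SPEC =====
def Spec_split_heading_tail_py (rest : String) (out : String × String) : Prop := out = split_heading_tail_py_alt rest
instance (rest : String) (out : String × String) : Decidable (Spec_split_heading_tail_py rest out) := by unfold Spec_split_heading_tail_py; infer_instance

-- ===== CLAIM (what is proved, stated in full; the proofs are below) =====
def Claim_equal_split_heading_tail_py : Prop := ∀ (rest : String), Dom_split_heading_tail_py rest → Spec_split_heading_tail_py rest (split_heading_tail_py rest)

-- ===== LEMMAS AND PROOFS =====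

lemma pvCondU (w : List Char) :
    (match PySem.Chars.stripChars w pvPunct with | [] => false | c :: _ => PySem.Chars.isupper c)
      = pvStartsUpper (pvClean w) := rfl

lemma pvCondL (w : List Char) :
    (match PySem.Chars.stripChars w pvPunct with | [] => false | c :: _ => PySem.Chars.islower c)
      = pvStartsLower (pvClean w) := rfl

lemma pvLoopA_seen (ws : List (List Char)) : ∀ (title : List (List Char)) (index : Nat), 1 ≤ index →
    pvLoopA ws index title true =
      match (ws.map pvClean).findIdx? pvStartsUpper with
      | none => (PySem.Chars.strip (PySem.Chars.join [' '] (title ++ ws)), [])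
      | some k => (PySem.Chars.strip (PySem.Chars.join [' '] (title ++ ws.take k)),
                   PySem.Chars.strip (PySem.Chars.join [' '] (ws.drop k))) := by
  induction ws with
  | nil => intro title index h; simp [pvLoopA]
  | cons w ws ih =>
    intro title index h
    rw [pvLoopA]
    simp only [pvCondU, pvCondL, List.map_cons, List.findIdx?_cons]
    by_cases hu : pvStartsUpper (pvClean w) = true
    · rw [if_pos ⟨by omega, by simp, hu⟩]
      simp [hu]
    · rw [if_neg (fun hc => hu hc.2.2), Bool.true_or,
        ih (title ++ [w]) (index + 1) (by omega)]
      cases hfi : (ws.map pvClean).findIdx? pvStartsUpper with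
      | none => simp [hu]
      | some k => simp [hu, List.take_succ_cons]

lemma pvLoopA_unseen (ws : List (List Char)) : ∀ (title : List (List Char)) (index : Nat),
    pvLoopA ws index title false =
      match (ws.map pvClean).findIdx? pvStartsLower with
      | none => (PySem.Chars.strip (PySem.Chars.join [' '] (title ++ ws)), [])
      | some fl =>
        match ((ws.map pvClean).drop (fl + 1)).findIdx? pvStartsUpper with
        | none => (PySem.Chars.strip (PySem.Chars.join [' '] (title ++ ws)), [])
        | some k => (PySem.Chars.strip (PySem.Chars.join [' '] (title ++ ws.take (fl + 1 + k))),
                     PySem.Chars.strip (PySem.Chars.join [' '] (ws.drop (fl + 1 + k)))) := by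
  induction ws with
  | nil => intro title index; simp [pvLoopA]
  | cons w ws ih =>
    intro title index
    rw [pvLoopA]
    simp only [pvCondU, pvCondL, List.map_cons, List.findIdx?_cons]
    rw [if_neg (fun hc => Bool.false_ne_true hc.2.1), Bool.false_or]
    by_cases hl : pvStartsLower (pvClean w) = true
    · rw [hl, pvLoopA_seen ws (title ++ [w]) (index + 1) (by omega)]
      cases hfu : (ws.map pvClean).findIdx? pvStartsUpper with
      | none => simp [-List.findIdx?_map, hfu]
      | some k => simp [-List.findIdx?_map, hfu, Nat.add_comm 1 k, List.take_succ_cons]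
    · rw [Bool.of_not_eq_true hl, ih (title ++ [w]) (index + 1)]
      cases hfi : (ws.map pvClean).findIdx? pvStartsLower with
      | none => simp [-List.findIdx?_map]
      | some fl =>
        cases hfu : ((ws.map pvClean).drop (fl + 1)).findIdx? pvStartsUpper with
        | none => simp [-List.findIdx?_map, hfu]
        | some k =>
          have h1 : fl + 1 + 1 + k = (fl + 1 + k) + 1 := by omega
          simp [-List.findIdx?_map, hfu, h1, List.take_succ_cons, List.drop_succ_cons]

-- ===== VERDICT (by name: the statement is the Claim_ definition above) =====
theorem split_heading_tail_py_spec : Claim_equal_split_heading_tail_py := by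
  intro rest _
  unfold Spec_split_heading_tail_py split_heading_tail_py split_heading_tail_py_alt
  by_cases hw : PySem.Chars.split₀ rest.toList = []
  · simp [hw]
  · simp only [if_neg hw]
    rw [pvLoopA_unseen (PySem.Chars.split₀ rest.toList) [] 0]
    cases hfl : ((PySem.Chars.split₀ rest.toList).map pvClean).findIdx? pvStartsLower with
    | none => simp only [List.nil_append]
    | some fl =>
      simp only [List.nil_append]
      cases hfu : (((PySem.Chars.split₀ rest.toList).map pvClean).drop (fl + 1)).findIdx? pvStartsUpper with
      | none => rfl
      | some k => rfl
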